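-- pv_equiv track=rewrite | github.com/samuel-casey/Skipping | backs/9-24/lookups.py | segment_it
-- ===== SOURCE A (Python) =====
-- def segment_it(listy):
--     st_count=-1
--     line_no = 0
--     segmented=[]
--     segment_include = False
--     # return listy
--     for line in listy:
--         element=line[0]
--         if element=='ST' or element=='PO1':
--             segment_include=True
--             segmented.append([])
--             st_count+=1
--         if segment_include == True:
--             segmented[st_count].append(listy[line_no])
--         if element=='SE':
--             segment_include=False
--         line_no+=1
--     return segmented
-- ===== SOURCE B (Python) =====
-- def segment_it(listy):
--     n = len(listy)
--     out = []
--     i = 0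
--     while i < n:
--         if listy[i][0] in ('ST', 'PO1'):
--             j = i + 1
--             while j < n and listy[j][0] not in ('ST', 'PO1', 'SE'):
--                 j += 1
--             end = j + 1 if j < n and listy[j][0] == 'SE' else j
--             out.append(listy[i:end])
--             i = end
--         else:
--             i += 1
--     return out
-- ===== Notes on version B (the rewrite author's own statement) =====
-- stated objective: alternative
-- what changed: Replaces A's flag-driven per-line append loop (mutable open segment, st_count bookkeeping) with a segment-at-a-time scan: find a start marker, scan ahead for the segment boundary (next start, or SE inclusive), and emit the whole segment as one slice.
import Mathlib
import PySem

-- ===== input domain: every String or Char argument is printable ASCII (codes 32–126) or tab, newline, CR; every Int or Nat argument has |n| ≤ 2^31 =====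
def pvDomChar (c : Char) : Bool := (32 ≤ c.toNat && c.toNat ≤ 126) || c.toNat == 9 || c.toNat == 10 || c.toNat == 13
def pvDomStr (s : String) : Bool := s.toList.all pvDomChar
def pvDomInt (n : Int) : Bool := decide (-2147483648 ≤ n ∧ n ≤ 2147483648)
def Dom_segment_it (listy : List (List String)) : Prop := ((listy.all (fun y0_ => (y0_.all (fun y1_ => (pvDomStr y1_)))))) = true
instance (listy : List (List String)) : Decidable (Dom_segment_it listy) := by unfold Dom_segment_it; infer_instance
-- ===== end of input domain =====

-- B replaces A's flag-driven per-line append loop with a segment-at-a-time boundary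
-- scan that emits each segment as one slice (objective: alternative decomposition).

-- ===== PORT A =====
-- loop body of A: state is (st_count, line_no, segmented, segment_include)
def segAStep (listy : List (List String))
    (st : Int × Int × List (List (List String)) × Bool) (line : List String) :
    Int × Int × List (List (List String)) × Bool :=
  match PySem.List.pyGet? line 0 with
  | none => st      -- line[0] raises IndexError in Python (empty line); excluded by Pre_
  | some element =>
    let st_count := st.1
    let line_no := st.2.1
    let segmented := st.2.2.1
    let inc := st.2.2.2
    let p : Int × List (List (List String)) × Bool :=
      if element = "ST" ∨ element = "PO1" then (st_count + 1, segmented ++ [[]], true)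
      else (st_count, segmented, inc)
    let st_count := p.1
    let segmented := p.2.1
    let inc := p.2.2
    let segmented :=
      if inc then
        PySem.List.pySetD segmented st_count
          (PySem.List.pyGetD segmented st_count [] ++ [PySem.List.pyGetD listy line_no []])
      else segmented
    let inc := if element = "SE" then false else inc
    (st_count, line_no + 1, segmented, inc)

def segment_it (listy : List (List String)) : List (List (List String)) :=
  (listy.foldl (segAStep listy) (-1, 0, [], false)).2.2.1

-- ===== PORT B =====
-- listy[k][0] (first element of line k)
def bHead (listy : List (List String)) (k : Nat) : Option String :=
  PySem.List.pyGet? (listy.getD k []) 0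

-- inner while: scan forward from j for the next boundary line (ST/PO1/SE)
def bScan (listy : List (List String)) (n j : Nat) : Nat :=
  if j < n then
    match bHead listy j with
    | none => j          -- Python raises IndexError here; excluded by Pre_
    | some f => if f = "ST" ∨ f = "PO1" ∨ f = "SE" then j else bScan listy n (j + 1)
  else j
termination_by n - j

theorem bScan_ge (listy : List (List String)) (n j : Nat) : j ≤ bScan listy n j := by
  unfold bScan
  split
  · split
    · exact le_refl j
    · split
      · exact le_refl j
      · exact le_trans (Nat.le_succ j) (bScan_ge listy n (j + 1))
  · exact le_refl j
termination_by n - j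

-- outer while: emit one slice per segment
def bLoop (listy : List (List String)) (n i : Nat) : List (List (List String)) :=
  if _hi : i < n then
    match bHead listy i with
    | none => []         -- Python raises IndexError here; excluded by Pre_
    | some f =>
      if f = "ST" ∨ f = "PO1" then
        let j := bScan listy n (i + 1)
        let e := if j < n ∧ bHead listy j = some "SE" then j + 1 else j
        PySem.List.slice listy (some (i : Int)) (some (e : Int)) :: bLoop listy n e
      else bLoop listy n (i + 1)
  else []
termination_by n - i
decreasing_by
  · have := bScan_ge listy n (i + 1); split <;> omega
  · omega

def segment_it_alt (listy : List (List String)) : List (List (List String)) :=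
  bLoop listy listy.length 0

-- ===== PRECONDITION & SPEC =====
-- Pre_ excludes exactly the inputs containing an empty line, on which A raises IndexError at line[0].
def Pre_segment_it (listy : List (List String)) : Prop := ∀ l ∈ listy, l ≠ []
instance (listy : List (List String)) : Decidable (Pre_segment_it listy) := by
  unfold Pre_segment_it; infer_instance
def pvWitness_segment_it : List (List String) := [["ST", "x"], ["AA"], ["SE"], ["ZZ"]]

def Spec_segment_it (listy : List (List String)) (out : List (List (List String))) : Prop := out = segment_it_alt listy
instance (listy : List (List String)) (out : List (List (List String))) : Decidable (Spec_segment_it listy out) := by unfold Spec_segment_it; infer_instance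

-- ===== CLAIM (what is proved, stated in full; the proofs are below) =====
def Claim_equal_segment_it : Prop := ∀ (listy : List (List String)), Dom_segment_it listy → Pre_segment_it listy → Spec_segment_it listy (segment_it listy)

-- ===== LEMMAS AND PROOFS =====

-- reference spec: cutSeg takes the remainder of an open segment (up to SE inclusive,
-- stopping before the next start marker) and returns it with the unconsumed suffix
def cutSeg : List (List String) → List (List String) × List (List String)
  | [] => ([], [])
  | l :: rest =>
    if l.head? = some "ST" ∨ l.head? = some "PO1" then ([], l :: rest)
    else if l.head? = some "SE" then ([l], rest)
    else ((l :: (cutSeg rest).1), (cutSeg rest).2)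

theorem cutSeg_snd_length (xs : List (List String)) : (cutSeg xs).2.length ≤ xs.length := by
  induction xs with
  | nil => simp [cutSeg]
  | cons l rest ih =>
    unfold cutSeg
    split
    · simp
    · split
      · simp
      · simpa using Nat.le_trans ih (Nat.le_succ _)

def specSeg : List (List String) → List (List (List String))
  | [] => []
  | l :: rest =>
    if l.head? = some "ST" ∨ l.head? = some "PO1" then
      (l :: (cutSeg rest).1) :: specSeg (cutSeg rest).2
    else specSeg rest
termination_by xs => xs.length
decreasing_by
  · have := cutSeg_snd_length rest; simp only [List.length_cons]; omega
  · simp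

-- basic bridge facts
theorem pyGet0_cons (a : String) (t : List String) : PySem.List.pyGet? (a :: t) 0 = some a := by
  simp [PySem.List.pyGet?, PySem.List.pyIdx?]

theorem set_last_eq {α : Type} (xs : List α) (h : xs ≠ []) (v : α) :
    xs.set (xs.length - 1) v = xs.dropLast ++ [v] := by
  induction xs with
  | nil => simp at h
  | cons a t ih =>
    cases t with
    | nil => simp
    | cons b u =>
      simp only [List.length_cons, Nat.add_sub_cancel, List.set_cons_succ, List.dropLast_cons₂,
        List.cons_append]
      have := ih (by simp)
      simpa using this

theorem pySetD_last {α : Type} (xs : List α) (h : xs ≠ []) (v : α) :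
    PySem.List.pySetD xs ((xs.length : Int) - 1) v = xs.dropLast ++ [v] := by
  have h1 : 1 ≤ xs.length := List.length_pos_of_ne_nil h
  have h2 : ((xs.length : Int) - 1) = ((xs.length - 1 : Nat) : Int) := by omega
  rw [h2, PySem.List.pySetD_natCast, set_last_eq xs h v]

theorem pyGetD_last {α : Type} (xs : List α) (h : xs ≠ []) (d : α) :
    PySem.List.pyGetD xs ((xs.length : Int) - 1) d = xs.getLast?.getD d := by
  have h1 : 1 ≤ xs.length := List.length_pos_of_ne_nil h
  have h2 : ((xs.length : Int) - 1) = ((xs.length - 1 : Nat) : Int) := by omega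
  rw [h2, PySem.List.pyGetD_natCast, List.getD_eq_getElem?_getD, List.getLast?_eq_getElem?]

theorem bHead_eq (listy : List (List String)) (k : Nat) (l : List String)
    (hk : listy[k]? = some l) (hne : l ≠ []) : bHead listy k = l.head? := by
  unfold bHead
  rw [List.getD_eq_getElem?_getD, hk]
  cases l with
  | nil => simp at hne
  | cons a t => simp [pyGet0_cons]

-- ===== B = specSeg =====
theorem cut_scan (listy : List (List String)) (hne : ∀ l ∈ listy, l ≠ []) :
    ∀ (m j : Nat), listy.length - j ≤ m →
    cutSeg (listy.drop j) =
      (if bScan listy listy.length j < listy.length ∧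
          bHead listy (bScan listy listy.length j) = some "SE"
       then ((listy.drop j).take (bScan listy listy.length j + 1 - j),
             listy.drop (bScan listy listy.length j + 1))
       else ((listy.drop j).take (bScan listy listy.length j - j),
             listy.drop (bScan listy listy.length j))) := by
  intro m
  induction m with
  | zero =>
    intro j hj
    have hj' : listy.length ≤ j := by omega
    have hd : listy.drop j = [] := List.drop_eq_nil_of_le hj'
    have hs : bScan listy listy.length j = j := by
      unfold bScan; simp [Nat.not_lt.mpr hj']
    rw [hs, hd, if_neg (by intro hc; omega :
      ¬ (j < listy.length ∧ bHead listy j = some "SE"))]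
    simp [cutSeg, List.drop_eq_nil_of_le hj']
  | succ m ih =>
    intro j hj
    by_cases hjn : j < listy.length
    · have hget : listy[j]? = some listy[j] := List.getElem?_eq_getElem hjn
      have hnel : listy[j] ≠ [] := hne _ (listy.getElem_mem hjn)
      have hhead : bHead listy j = listy[j].head? := bHead_eq listy j _ hget hnel
      have hdrop : listy.drop j = listy[j] :: listy.drop (j + 1) :=
        List.drop_eq_getElem_cons hjn
      obtain ⟨a, t, hl⟩ : ∃ a t, listy[j] = a :: t := by
        cases h : listy[j] with
        | nil => exact absurd h hnel
        | cons a t => exact ⟨a, t, rfl⟩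
      have hha : bHead listy j = some a := by rw [hhead, hl]; rfl
      by_cases hb : a = "ST" ∨ a = "PO1" ∨ a = "SE"
      · -- boundary line: the scan stops at j
        have hs : bScan listy listy.length j = j := by
          unfold bScan; simp [hjn, hha, hb]
        rw [hs]
        rcases hb with hb | hb | hb
        · rw [if_neg (by rintro ⟨-, hc⟩; rw [hha] at hc; simp [hb] at hc), hdrop]
          have hh : listy[j].head? = some "ST" := by rw [hl, hb]; rfl
          simp [cutSeg, hh, ← hdrop]
        · rw [if_neg (by rintro ⟨-, hc⟩; rw [hha] at hc; simp [hb] at hc), hdrop]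
          have hh : listy[j].head? = some "PO1" := by rw [hl, hb]; rfl
          simp [cutSeg, hh, ← hdrop]
        · rw [if_pos ⟨hjn, by rw [hha, hb]⟩]
          have hh : listy[j].head? = some "SE" := by rw [hl, hb]; rfl
          have e2 : j + 1 - j = 1 := by omega
          rw [e2, hdrop]
          conv_lhs => rw [cutSeg]
          rw [if_neg (by rw [hh]; simp), if_pos (by rw [hh])]
          rfl
      · -- not a boundary: the scan moves on to j + 1
        push_neg at hb
        obtain ⟨hb1, hb2, hb3⟩ := hb
        have hs : bScan listy listy.length j = bScan listy listy.length (j + 1) := by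
          conv_lhs => rw [bScan]
          simp [hjn, hha, hb1, hb2, hb3]
        have hge : j + 1 ≤ bScan listy listy.length (j + 1) := bScan_ge _ _ _
        have ihj := ih (j + 1) (by omega)
        have hh : listy[j].head? = some a := by rw [hl]; rfl
        have hcut : cutSeg (listy[j] :: listy.drop (j + 1)) =
            ((listy[j] :: (cutSeg (listy.drop (j + 1))).1), (cutSeg (listy.drop (j + 1))).2) := by
          conv_lhs => rw [cutSeg]
          rw [if_neg (by rw [hh]; simp [hb1, hb2]), if_neg (by rw [hh]; simp [hb3])]
        rw [hs, hdrop, hcut, ihj]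
        by_cases hc : bScan listy listy.length (j + 1) < listy.length ∧
            bHead listy (bScan listy listy.length (j + 1)) = some "SE"
        · rw [if_pos hc, if_pos hc]
          have e2 : bScan listy listy.length (j + 1) + 1 - j =
              (bScan listy listy.length (j + 1) + 1 - (j + 1)) + 1 := by omega
          rw [e2, List.take_succ_cons]
        · rw [if_neg hc, if_neg hc]
          have e2 : bScan listy listy.length (j + 1) - j =
              (bScan listy listy.length (j + 1) - (j + 1)) + 1 := by omega
          rw [e2, List.take_succ_cons]
    · have hd : listy.drop j = [] := List.drop_eq_nil_of_le (by omega)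
      have hs : bScan listy listy.length j = j := by
        unfold bScan; simp [hjn]
      rw [hs, hd, if_neg (by intro hc; omega :
        ¬ (j < listy.length ∧ bHead listy j = some "SE"))]
      simp [cutSeg, List.drop_eq_nil_of_le (show listy.length ≤ j by omega)]

theorem bLoop_eq (listy : List (List String)) (hne : ∀ l ∈ listy, l ≠ []) :
    ∀ (m i : Nat), listy.length - i ≤ m →
    bLoop listy listy.length i = specSeg (listy.drop i) := by
  intro m
  induction m with
  | zero =>
    intro i hi
    rw [bLoop, dif_neg (by omega : ¬ i < listy.length),
      List.drop_eq_nil_of_le (by omega : listy.length ≤ i)]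
    simp [specSeg]
  | succ m ih =>
    intro i hi
    by_cases hin : i < listy.length
    · have hget : listy[i]? = some listy[i] := List.getElem?_eq_getElem hin
      have hnel : listy[i] ≠ [] := hne _ (listy.getElem_mem hin)
      have hhead : bHead listy i = listy[i].head? := bHead_eq listy i _ hget hnel
      obtain ⟨a, t, hl⟩ : ∃ a t, listy[i] = a :: t := by
        cases h : listy[i] with
        | nil => exact absurd h hnel
        | cons a t => exact ⟨a, t, rfl⟩
      have hha : bHead listy i = some a := by rw [hhead, hl]; rfl
      have hh : listy[i].head? = some a := by rw [hl]; rfl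
      have hdrop : listy.drop i = listy[i] :: listy.drop (i + 1) :=
        List.drop_eq_getElem_cons hin
      by_cases hst : a = "ST" ∨ a = "PO1"
      · -- start of a segment
        have hge : i + 1 ≤ bScan listy listy.length (i + 1) := bScan_ge _ _ _
        have hcs := cut_scan listy hne m (i + 1) (by omega)
        rw [bLoop, dif_pos hin, hha]
        dsimp only
        rw [if_pos hst]
        set j := bScan listy listy.length (i + 1) with hj
        have hspec : specSeg (listy.drop i) =
            (listy[i] :: (cutSeg (listy.drop (i + 1))).1) ::
              specSeg ((cutSeg (listy.drop (i + 1))).2) := by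
          rw [hdrop]
          conv_lhs => rw [specSeg]
          rw [if_pos (by rw [hh]; rcases hst with h | h <;> rw [h] <;> simp)]
        rw [hspec, hcs]
        by_cases hc : j < listy.length ∧ bHead listy j = some "SE"
        · rw [if_pos hc, if_pos hc, ih (j + 1) (by omega)]
          congr 1
          rw [PySem.List.slice_natCast, hdrop]
          have e2 : j + 1 - i = (j + 1 - (i + 1)) + 1 := by omega
          rw [e2, List.take_succ_cons]
        · rw [if_neg hc, if_neg hc, ih j (by omega)]
          congr 1
          rw [PySem.List.slice_natCast, hdrop]
          have e2 : j - i = (j - (i + 1)) + 1 := by omega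
          rw [e2, List.take_succ_cons]
      · -- not a start: skip the line
        push_neg at hst
        rw [bLoop, dif_pos hin, hha]
        dsimp only
        rw [if_neg (by rintro (h | h); exacts [hst.1 h, hst.2 h]), ih (i + 1) (by omega), hdrop]
        conv_rhs => rw [specSeg]
        rw [if_neg (by rw [hh]; simp [hst.1, hst.2])]
    · rw [bLoop, dif_neg (by omega : ¬ i < listy.length),
        List.drop_eq_nil_of_le (by omega : listy.length ≤ i)]
      simp [specSeg]

-- ===== A = specSeg =====
theorem pySetD_append_singleton {α : Type} (xs : List α) (x v : α) :
    PySem.List.pySetD (xs ++ [x]) ((xs.length : Int) - 1 + 1) v = xs ++ [v] := by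
  have e1 : (xs.length : Int) - 1 + 1 = (((xs ++ [x]).length : Int) - 1) := by simp
  rw [e1, pySetD_last _ (by simp) v, List.dropLast_concat]

theorem pyGetD_append_singleton {α : Type} (xs : List α) (x d : α) :
    PySem.List.pyGetD (xs ++ [x]) ((xs.length : Int) - 1 + 1) d = x := by
  have e1 : (xs.length : Int) - 1 + 1 = (((xs ++ [x]).length : Int) - 1) := by simp
  rw [e1, pyGetD_last _ (by simp), List.getLast?_concat]
  rfl

theorem foldA_eq (listy : List (List String)) (hne : ∀ l ∈ listy, l ≠ []) :
    ∀ (rest : List (List String)) (k : Nat) (segmented : List (List (List String))) (inc : Bool),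
    listy.drop k = rest → (inc = true → segmented ≠ []) →
    (rest.foldl (segAStep listy) ((segmented.length : Int) - 1, (k : Int), segmented, inc)).2.2.1 =
      if inc then
        segmented.dropLast ++
          ((segmented.getLast?.getD [] ++ (cutSeg rest).1) :: specSeg ((cutSeg rest).2))
      else segmented ++ specSeg rest := by
  intro rest
  induction rest with
  | nil =>
    intro k segmented inc hdrop hinc
    cases inc with
    | false => simp [cutSeg, specSeg]
    | true =>
      have hs : segmented ≠ [] := hinc rfl
      simp only [List.foldl_nil, if_true, cutSeg, specSeg, List.append_nil]
      rw [List.getLast?_eq_some_getLast hs]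
      simp [List.dropLast_concat_getLast]
  | cons l rs ih =>
    intro k segmented inc hdrop hinc
    have hlen : k < listy.length := by
      have := congrArg List.length hdrop
      simp [List.length_drop] at this
      omega
    have hget : listy[k]? = some l := by
      have h0 := List.getElem?_drop (xs := listy) (i := k) (j := 0)
      rw [hdrop] at h0
      simpa using h0.symm
    have hmem : l ∈ listy :=
      List.mem_of_mem_drop (l := listy) (i := k) (by rw [hdrop]; exact List.mem_cons_self)
    have hnel : l ≠ [] := hne _ hmem
    obtain ⟨a, t, hl⟩ : ∃ a t, l = a :: t := by
      cases h : l with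
      | nil => exact absurd h hnel
      | cons a t => exact ⟨a, t, rfl⟩
    have hpy : PySem.List.pyGet? l 0 = some a := by rw [hl]; exact pyGet0_cons a t
    have hhd : l.head? = some a := by rw [hl]; rfl
    have hdrop1 : listy.drop (k + 1) = rs := by
      rw [← List.tail_drop, hdrop, List.tail_cons]
    have hgetD : PySem.List.pyGetD listy (k : Int) [] = l := by
      rw [PySem.List.pyGetD_natCast, List.getD_eq_getElem?_getD, hget]
      rfl
    have hcast : ((k : Int) + 1) = ((k + 1 : Nat) : Int) := by push_cast; ring
    rw [List.foldl_cons]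
    by_cases hst : a = "ST" ∨ a = "PO1"
    · -- start marker: open a fresh segment and put this line into it
      have hSE : ¬ a = "SE" := by rcases hst with h | h <;> rw [h] <;> decide
      have hstep : segAStep listy ((segmented.length : Int) - 1, (k : Int), segmented, inc) l =
          (((segmented ++ [[l]]).length : Int) - 1, ((k + 1 : Nat) : Int),
            segmented ++ [[l]], true) := by
        unfold segAStep
        rw [hpy]
        dsimp only
        rw [if_pos hst]
        dsimp only
        rw [if_pos rfl, pyGetD_append_singleton, pySetD_append_singleton, if_neg hSE, hgetD]
        refine congrArg (fun z => (z, _, _, _)) ?_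
        simp
      rw [hstep, ih (k + 1) (segmented ++ [[l]]) true hdrop1 (by simp)]
      have hcutc : cutSeg (l :: rs) = ([], l :: rs) := by
        conv_lhs => rw [cutSeg]
        rw [if_pos (by rw [hhd]; rcases hst with h | h <;> rw [h] <;> simp)]
      have hspecc : specSeg (l :: rs) = (l :: (cutSeg rs).1) :: specSeg ((cutSeg rs).2) := by
        conv_lhs => rw [specSeg]
        rw [if_pos (by rw [hhd]; rcases hst with h | h <;> rw [h] <;> simp)]
      cases inc with
      | false =>
        rw [if_pos rfl, if_neg (by simp), hspecc]
        simp [List.dropLast_concat, List.getLast?_concat]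
      | true =>
        have hs : segmented ≠ [] := hinc rfl
        rw [if_pos rfl, if_pos rfl, hcutc, hspecc]
        simp only [List.dropLast_concat, List.getLast?_concat, Option.getD_some,
          List.append_nil, List.singleton_append]
        rw [List.getLast?_eq_some_getLast hs]
        have hdc : segmented.dropLast ++ [segmented.getLast hs] = segmented :=
          List.dropLast_concat_getLast hs
        conv_lhs => rw [← hdc]
        simp
    · -- not a start marker
      push_neg at hst
      obtain ⟨hb1, hb2⟩ := hst
      have hcutc : cutSeg (l :: rs) =
          if l.head? = some "SE" then ([l], rs)
          else ((l :: (cutSeg rs).1), (cutSeg rs).2) := by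
        conv_lhs => rw [cutSeg]
        rw [if_neg (by rw [hhd]; simp [hb1, hb2])]
      have hspecc : specSeg (l :: rs) = specSeg rs := by
        conv_lhs => rw [specSeg]
        rw [if_neg (by rw [hhd]; simp [hb1, hb2])]
      cases inc with
      | false =>
        have hstep : segAStep listy ((segmented.length : Int) - 1, (k : Int), segmented, false) l =
            ((segmented.length : Int) - 1, ((k + 1 : Nat) : Int), segmented, false) := by
          unfold segAStep
          rw [hpy]
          dsimp only
          rw [if_neg (by rw [hhd] at *; rintro (h | h); exacts [hb1 h, hb2 h])]
          dsimp only
          rw [if_neg (by simp), hcast, ite_self]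
        rw [hstep, ih (k + 1) segmented false hdrop1 (by simp), if_neg (by simp),
          if_neg (by simp), hspecc]
      | true =>
        have hs : segmented ≠ [] := hinc rfl
        have hstep : segAStep listy ((segmented.length : Int) - 1, (k : Int), segmented, true) l =
            (((segmented.dropLast ++ [segmented.getLast?.getD [] ++ [l]]).length : Int) - 1,
              ((k + 1 : Nat) : Int),
              segmented.dropLast ++ [segmented.getLast?.getD [] ++ [l]],
              if a = "SE" then false else true) := by
          unfold segAStep
          rw [hpy]
          dsimp only
          rw [if_neg (by rintro (h | h); exacts [hb1 h, hb2 h])]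
          dsimp only
          rw [if_pos rfl, pySetD_last _ hs, pyGetD_last _ hs, hgetD, hcast]
          refine congrArg (fun z => (z, _, _, _)) ?_
          have h1 : 1 ≤ segmented.length := List.length_pos_of_ne_nil hs
          simp [List.length_dropLast]
          omega
        rw [hstep]
        by_cases hSE : a = "SE"
        · rw [if_pos hSE, ih (k + 1) _ false hdrop1 (by simp),
            if_neg (show ¬ (false = true) by simp), if_pos (show true = true from rfl),
            hcutc, if_pos (by rw [hhd, hSE])]
          simp [List.append_assoc]
        · rw [if_neg hSE, ih (k + 1) _ true hdrop1 (by simp), if_pos (show true = true from rfl),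
            hcutc, if_neg (show ¬ (l.head? = some "SE") by rw [hhd]; simp [hSE])]
          simp [List.dropLast_concat, List.append_assoc]

theorem segment_it_spec : Claim_equal_segment_it := by
  intro listy _ hpre
  unfold Spec_segment_it segment_it segment_it_alt
  have hA := foldA_eq listy hpre listy 0 [] false (by simp) (by simp)
  norm_num at hA
  have hB := bLoop_eq listy hpre listy.length 0 (by omega)
  rw [List.drop_zero] at hB
  rw [hB, ← hA]
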